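-- pv_equiv track=rewrite | github.com/mabarber92/bnf-openiti | archive/debug_scripts/debug_single_record_candidates.py | build_bnf_author_candidates
-- ===== SOURCE A (Python) =====
-- def build_bnf_author_candidates(record):
--     candidates = {"lat": [], "ara": []}
--     for creator in record.get("creator_lat", []) or []:
--         if creator and creator not in candidates["lat"]:
--             candidates["lat"].append(creator)
--     for creator in record.get("creator_ara", []) or []:
--         if creator and creator not in candidates["ara"]:
--             candidates["ara"].append(creator)
--     for contrib in record.get("contributor_lat", []) or []:
--         if contrib and contrib not in candidates["lat"]:
--             candidates["lat"].append(contrib)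
--     for contrib in record.get("contributor_ara", []) or []:
--         if contrib and contrib not in candidates["ara"]:
--             candidates["ara"].append(contrib)
--     for desc in record.get("description_candidates_lat", []) or []:
--         if desc and desc not in candidates["lat"]:
--             candidates["lat"].append(desc)
--     for desc in record.get("description_candidates_ara", []) or []:
--         if desc and desc not in candidates["ara"]:
--             candidates["ara"].append(desc)
--     return candidates
-- ===== SOURCE B (Python) =====
-- def build_bnf_author_candidates(record):
--     result = {}
--     for lang in ("lat", "ara"):
--         # flatten the three source lists for this language, data-driven
--         xs = []
--         for key in ("creator", "contributor", "description_candidates"):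
--             xs.extend(record.get(f"{key}_{lang}") or [])
--         # dedup by repeatedly emitting the head and purging its copies
--         # from the remainder (falsy heads are purged but not emitted)
--         out = []
--         while xs:
--             h = xs[0]
--             if h:
--                 out.append(h)
--             xs = [x for x in xs[1:] if x != h]
--         result[lang] = out
--     return result
-- ===== Notes on version B (the rewrite author's own statement) =====
-- stated objective: alternative
-- what changed: Replaces six interleaved append-if-absent loops (membership test against the growing output) with a data-driven flatten of the three source lists per language followed by a purge-the-remainder dedup: repeatedly emit the head and filter all of its copies out of the remaining sequence.
import Mathlib
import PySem

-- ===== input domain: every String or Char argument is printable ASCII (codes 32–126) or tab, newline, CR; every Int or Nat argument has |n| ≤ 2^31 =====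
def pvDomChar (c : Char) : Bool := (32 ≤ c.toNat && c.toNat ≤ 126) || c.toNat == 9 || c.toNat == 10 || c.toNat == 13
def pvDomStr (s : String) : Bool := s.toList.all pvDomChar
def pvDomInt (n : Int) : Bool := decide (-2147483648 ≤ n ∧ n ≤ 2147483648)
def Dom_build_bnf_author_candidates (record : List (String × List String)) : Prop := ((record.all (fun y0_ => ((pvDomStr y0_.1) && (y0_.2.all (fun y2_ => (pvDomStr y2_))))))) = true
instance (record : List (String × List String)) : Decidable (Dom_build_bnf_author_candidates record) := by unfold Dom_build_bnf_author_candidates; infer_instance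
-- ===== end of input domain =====

-- B replaces A's six interleaved append-if-absent loops by a data-driven flatten of the three
-- source lists per language followed by a purge-the-remainder dedup (emit head, filter its
-- copies out of the rest); alternative decomposition, same cost.


-- ===== PORT A =====
def pvOrList (l : List String) : List String :=
  if l.isEmpty then [] else l

def pvStepA (acc : List String) (x : String) : List String :=
  if x != "" && !(acc.contains x) then acc ++ [x] else acc

def build_bnf_author_candidates (record : List (String × List String)) : List (String × List String) :=
  let lat0 : List String := []
  let ara0 : List String := []
  let lat1 := (pvOrList ((List.lookup "creator_lat" record).getD [])).foldl pvStepA lat0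
  let ara1 := (pvOrList ((List.lookup "creator_ara" record).getD [])).foldl pvStepA ara0
  let lat2 := (pvOrList ((List.lookup "contributor_lat" record).getD [])).foldl pvStepA lat1
  let ara2 := (pvOrList ((List.lookup "contributor_ara" record).getD [])).foldl pvStepA ara1
  let lat3 := (pvOrList ((List.lookup "description_candidates_lat" record).getD [])).foldl pvStepA lat2
  let ara3 := (pvOrList ((List.lookup "description_candidates_ara" record).getD [])).foldl pvStepA ara2
  [("lat", lat3), ("ara", ara3)]

-- ===== PORT B =====
def pvGetB (record : List (String × List String)) (k : String) : List String :=
  match List.lookup k record with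
  | some l => if l.isEmpty then [] else l
  | none => []

-- the while loop of Source B: emit the head (if truthy) and purge its copies from the remainder
def pvNub : List String → List String
  | [] => []
  | h :: t => (if h != "" then [h] else []) ++ pvNub (t.filter (fun x => x != h))
termination_by l => l.length
decreasing_by
  simp only [List.length_cons, List.length_unattach]
  exact Nat.lt_succ_of_le (le_trans (List.length_filter_le _ _) (by simp))

def build_bnf_author_candidates_alt (record : List (String × List String)) : List (String × List String) :=
  ["lat", "ara"].map (fun lang =>
    (lang, pvNub (["creator", "contributor", "description_candidates"].flatMap
      (fun key => pvGetB record (key ++ "_" ++ lang)))))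

-- ===== PRECONDITION & SPEC =====
def Spec_build_bnf_author_candidates (record : List (String × List String)) (out : List (String × List String)) : Prop := out = build_bnf_author_candidates_alt record
instance (record : List (String × List String)) (out : List (String × List String)) : Decidable (Spec_build_bnf_author_candidates record out) := by unfold Spec_build_bnf_author_candidates; infer_instance

-- ===== CLAIM (what is proved, stated in full; the proofs are below) =====
def Claim_equal_build_bnf_author_candidates : Prop := ∀ (record : List (String × List String)), Dom_build_bnf_author_candidates record → Spec_build_bnf_author_candidates record (build_bnf_author_candidates record)

-- ===== LEMMAS AND PROOFS =====
lemma pvOrList_eq (l : List String) : pvOrList l = l := by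
  cases l <;> rfl

lemma pvGetB_eq (record : List (String × List String)) (k : String) :
    pvGetB record k = (List.lookup k record).getD [] := by
  unfold pvGetB
  cases List.lookup k record with
  | none => rfl
  | some l => cases l <;> rfl

lemma foldl_stepA_nub (l acc : List String) :
    l.foldl pvStepA acc
      = acc ++ pvNub (l.filter (fun x => x != "" && !acc.contains x)) := by
  induction l generalizing acc with
  | nil => simp [pvNub]
  | cons x t ih =>
    by_cases hx : x = ""
    · subst hx
      simp [pvStepA, ih]
    · by_cases hm : x ∈ acc
      · have : pvStepA acc x = acc := by simp [pvStepA, hm]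
        simp only [List.foldl_cons, this, List.filter_cons]
        have : (x != "" && !acc.contains x) = false := by simp [hm]
        rw [this]
        exact ih acc
      · have hstep : pvStepA acc x = acc ++ [x] := by simp [pvStepA, hx, hm]
        have hpred : (x != "" && !acc.contains x) = true := by simp [hx, hm]
        simp only [List.foldl_cons, hstep, List.filter_cons, hpred, if_pos]
        rw [ih (acc ++ [x])]
        have hx' : (x != "") = true := by simp [hx]
        rw [pvNub, if_pos hx']
        have hfil : t.filter (fun y => y != "" && !(acc ++ [x]).contains y)
            = (t.filter (fun y => y != "" && !acc.contains y)).filter (fun y => y != x) := by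
          rw [List.filter_filter]
          apply List.filter_congr
          intro y _
          by_cases hyx : y = x <;> by_cases hya : y ∈ acc <;>
            simp [hyx, hya, List.contains_eq_mem, bne]
        rw [hfil]
        simp

lemma pvNub_filter_ne_empty_aux (n : Nat) :
    ∀ l : List String, l.length ≤ n → pvNub (l.filter (fun x => x != "")) = pvNub l := by
  induction n with
  | zero =>
    intro l hl
    have : l = [] := List.eq_nil_of_length_eq_zero (Nat.le_zero.mp hl)
    subst this; rfl
  | succ n ih =>
    intro l hl
    match l with
    | [] => rfl
    | h :: t =>
      by_cases hh : h = ""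
      · subst hh
        rw [pvNub]
        simp only [List.filter_cons, bne_self_eq_false, Bool.false_eq_true, if_false,
          List.nil_append]
      · have hh' : (h != "") = true := by simp [hh]
        have hcomm : (t.filter (fun x => x != "")).filter (fun x => x != h)
            = (t.filter (fun x => x != h)).filter (fun x => x != "") := by
          rw [List.filter_filter, List.filter_filter]
          apply List.filter_congr
          intro y _
          exact Bool.and_comm _ _
        have hlen : (t.filter (fun x => x != h)).length ≤ n :=
          le_trans (List.length_filter_le _ _) (Nat.le_of_succ_le_succ hl)
        rw [List.filter_cons, if_pos hh', pvNub, pvNub, hcomm, ih _ hlen]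

lemma pvNub_filter_ne_empty (l : List String) :
    pvNub (l.filter (fun x => x != "")) = pvNub l :=
  pvNub_filter_ne_empty_aux l.length l le_rfl

-- ===== VERDICT (by name: the statement is the Claim_ definition above) =====
theorem build_bnf_author_candidates_spec : Claim_equal_build_bnf_author_candidates := by
  intro record _
  unfold Spec_build_bnf_author_candidates build_bnf_author_candidates build_bnf_author_candidates_alt
  simp only [pvOrList_eq, pvGetB_eq, List.map_cons, List.map_nil, List.flatMap_cons,
    List.flatMap_nil, List.append_nil]
  rw [← List.foldl_append, ← List.foldl_append, ← List.foldl_append, ← List.foldl_append,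
    foldl_stepA_nub, foldl_stepA_nub]
  simp only [List.nil_append, List.contains_nil, Bool.not_false, Bool.and_true,
    pvNub_filter_ne_empty]
  rfl
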